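-- pv_equiv track=rewrite | github.com/arturoornelasb/-Bipolar-Triadic-Neurosymbolic-Framework- | validacion_v1.0.0/scalability_analysis.py | estimate_concept_size
-- ===== SOURCE A (Python) =====
-- def estimate_concept_size(num_attributes):
--     """
--     Estimates the magnitude of a concept's integer value based on the number of attributes.
--     Assumes attributes are mapped to the first N primes.
--     """
--     # 1. Generate first N primes
--     primes = []
--     candidate = 2
--     while len(primes) < num_attributes:
--         is_prime = True
--         for p in primes:
--             if candidate % p == 0:
--                 is_prime = False
--                 break
--         if is_prime:
--             primes.append(candidate)
--         candidate += 1
--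
--     # 2. Calculate Product (Worst Case: A concept has ALL first N attributes)
--     # In reality, a concept has a subset, but we want to see the magnitude of the "Basis".
--
--     # Let's assume a concept has 'k' attributes.
--     # We'll test for a concept having the *average* prime value, or just the first k primes.
--
--     # Scenario A: Concept has the first k primes (Dense concept)
--     product = 1
--     for p in primes:
--         product *= p
--
--     return product, primes[-1]
-- ===== SOURCE B (Python) =====
-- def estimate_concept_size(num_attributes):
--     # Different decomposition: no prime list is kept at all.  A standalone
--     # sqrt-bounded trial-division primality test drives a "find next prime"
--     # search, and the product is accumulated as each prime is found.
--     def is_prime(c):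
--         d = 2
--         while d * d <= c:
--             if c % d == 0:
--                 return False
--             d += 1
--         return True
--
--     product = 1
--     c = 2
--     for _ in range(num_attributes):
--         while not is_prime(c):
--             c += 1
--         product *= c
--         c += 1
--     return product, c - 1
-- ===== Notes on version B (the rewrite author's own statement) =====
-- stated objective: faster
-- what changed: B keeps no prime list at all: a standalone sqrt-bounded trial-division primality test drives a next-prime search and the product is accumulated on the fly, instead of A's division of each candidate by every previously found prime and a second product pass.
import Mathlib
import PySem

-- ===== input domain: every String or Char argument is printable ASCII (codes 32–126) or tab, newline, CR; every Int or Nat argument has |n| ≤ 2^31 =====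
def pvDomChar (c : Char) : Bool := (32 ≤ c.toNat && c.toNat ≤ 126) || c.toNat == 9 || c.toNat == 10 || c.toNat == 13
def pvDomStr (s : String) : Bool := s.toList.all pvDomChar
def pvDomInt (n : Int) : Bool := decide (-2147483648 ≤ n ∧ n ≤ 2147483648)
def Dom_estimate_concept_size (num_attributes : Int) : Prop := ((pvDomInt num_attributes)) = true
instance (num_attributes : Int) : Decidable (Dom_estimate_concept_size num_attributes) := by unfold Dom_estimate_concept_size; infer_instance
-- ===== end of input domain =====

-- B keeps no prime list: a standalone sqrt-bounded trial-division primality test drives a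
-- next-prime search with the product accumulated on the fly; intended as faster (the timing
-- run measures it; A divides each candidate by every prime found so far and re-scans for the product).


-- ===== PORT A =====
-- inner 'for p in primes: if candidate % p == 0: is_prime = False; break'
def pvCheckA (primes : List Int) (c : Int) : Bool :=
  match primes with
  | [] => true
  | p :: ps => if PySem.Int.mod c p = 0 then false else pvCheckA ps c

-- the while loop; the fuel argument only makes the same computation total (2^(n+2)
-- candidates are always enough, and the loop stops by its own test long before)
def pvLoopA (num_attributes : Int) : Nat → List Int → Int → List Int
  | 0, primes, _ => primes
  | fuel+1, primes, c =>
    if (primes.length : Int) < num_attributes then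
      let primes' := if pvCheckA primes c then primes ++ [c] else primes
      pvLoopA num_attributes fuel primes' (c + 1)
    else primes

def estimate_concept_size (num_attributes : Int) : List Int :=
  let primes := pvLoopA num_attributes (2 ^ (num_attributes.toNat + 2)) [] 2
  let product := primes.foldl (fun acc p => acc * p) 1
  -- primes[-1]; none = IndexError (empty list), excluded by Pre_
  [product, (PySem.List.pyGet? primes (-1)).getD 0]

-- ===== PORT B =====
-- 'while d * d <= c: if c % d == 0: return False; d += 1'; the fuel only makes the
-- loop total (d passes sqrt c within c.toNat+2 increments)
def pvTrialB (c : Int) : Nat → Int → Bool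
  | 0, _ => true
  | f+1, d =>
    if d * d ≤ c then
      if PySem.Int.mod c d = 0 then false else pvTrialB c f (d + 1)
    else true

def pvIsPrimeB (c : Int) : Bool := pvTrialB c (c.toNat + 2) 2

-- 'while not is_prime(c): c += 1'; the fuel only makes the search total
-- (a prime ≥ c exists below c + 2*c.toNat + 4)
def pvNextB : Nat → Int → Int
  | 0, c => c
  | f+1, c => if pvIsPrimeB c then c else pvNextB f (c + 1)

-- 'for _ in range(num_attributes)': one recursive step per prime produced
def pvRunB : Nat → Int → Int → Int × Int
  | 0, product, c => (product, c)
  | k+1, product, c =>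
    let q := pvNextB (2 * c.toNat + 4) c
    pvRunB k (product * q) (q + 1)

def estimate_concept_size_alt (num_attributes : Int) : List Int :=
  let r := pvRunB num_attributes.toNat 1 2
  [r.1, r.2 - 1]

-- ===== PRECONDITION & SPEC =====
-- Pre_ excludes num_attributes ≤ 0: there primes stays empty and Python's primes[-1] raises IndexError.
def Pre_estimate_concept_size (num_attributes : Int) : Prop := 1 ≤ num_attributes
instance (num_attributes : Int) : Decidable (Pre_estimate_concept_size num_attributes) := by unfold Pre_estimate_concept_size; infer_instance
def pvWitness_estimate_concept_size : Int := 5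

def Spec_estimate_concept_size (num_attributes : Int) (out : List Int) : Prop := out = estimate_concept_size_alt num_attributes
instance (num_attributes : Int) (out : List Int) : Decidable (Spec_estimate_concept_size num_attributes out) := by unfold Spec_estimate_concept_size; infer_instance

-- ===== CLAIM (what is proved, stated in full; the proofs are below) =====
def Claim_equal_estimate_concept_size : Prop := ∀ (num_attributes : Int), Dom_estimate_concept_size num_attributes → Pre_estimate_concept_size num_attributes → Spec_estimate_concept_size num_attributes (estimate_concept_size num_attributes)

-- ===== LEMMAS AND PROOFS =====

-- loop invariant: primes is exactly the ascending list of all primes below the candidate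
def pvInv (primes : List Int) (c : Int) : Prop :=
  List.Pairwise (· < ·) primes ∧ 2 ≤ c ∧
    ∀ p : Int, p ∈ primes ↔ (2 ≤ p ∧ p < c ∧ Nat.Prime p.natAbs)

theorem pvCheckA_iff (primes : List Int) (c : Int) :
    pvCheckA primes c = true ↔ ∀ p ∈ primes, ¬ PySem.Int.mod c p = 0 := by
  induction primes with
  | nil => simp [pvCheckA]
  | cons p ps ih =>
    simp only [pvCheckA]
    by_cases h : PySem.Int.mod c p = 0 <;> simp [h, ih]

-- a composite candidate ≥ 2 has a prime factor q with q < c and q*q ≤ c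
theorem pvSmallFactor (c : Int) (h2 : 2 ≤ c) (hnp : ¬ Nat.Prime c.natAbs) :
    ∃ q : Int, 2 ≤ q ∧ q < c ∧ q * q ≤ c ∧ Nat.Prime q.natAbs ∧ q ∣ c := by
  set m := c.natAbs with hm
  have hc : c = (m : Int) := by omega
  have hm2 : 2 ≤ m := by omega
  have hm1 : m ≠ 1 := by omega
  have hq := Nat.minFac_prime hm1
  have hqd : m.minFac ∣ m := Nat.minFac_dvd m
  have hqne : m.minFac ≠ m := fun h => hnp (h ▸ hq)
  have hqlt : m.minFac < m := lt_of_le_of_ne (Nat.le_of_dvd (by omega) hqd) hqne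
  have hqsq : m.minFac * m.minFac ≤ m := by
    have := Nat.minFac_sq_le_self (by omega) hnp
    simpa [pow_two] using this
  refine ⟨(m.minFac : Int), ?_, ?_, ?_, ?_, ?_⟩
  · exact_mod_cast hq.two_le
  · omega
  · rw [hc]; exact_mod_cast hqsq
  · simpa using hq
  · rw [hc]; exact_mod_cast hqd

theorem pvDvd_false (primes : List Int) (c : Int) (h : pvInv primes c) (h2 : 2 ≤ c)
    (hp : Nat.Prime c.natAbs) : ∀ p ∈ primes, ¬ PySem.Int.mod c p = 0 := by
  intro p hpmem hmod
  obtain ⟨hp2, hplt, hpprime⟩ := (h.2.2 p).mp hpmem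
  have hdvd : p ∣ c := (PySem.Int.mod_eq_zero_iff_dvd c p).mp hmod
  have hdn : p.natAbs ∣ c.natAbs := Int.natAbs_dvd_natAbs.mpr hdvd
  rcases (Nat.Prime.eq_one_or_self_of_dvd hp _ hdn) with h1 | hself
  · omega
  · omega

theorem pvCheckA_prime (primes : List Int) (c : Int) (h : pvInv primes c) :
    pvCheckA primes c = true ↔ Nat.Prime c.natAbs := by
  have h2 : 2 ≤ c := h.2.1
  rw [pvCheckA_iff]
  constructor
  · intro hall
    by_contra hnp
    obtain ⟨q, hq2, hqlt, _, hqp, hqd⟩ := pvSmallFactor c h2 hnp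
    have hqmem : q ∈ primes := (h.2.2 q).mpr ⟨hq2, hqlt, hqp⟩
    exact hall q hqmem ((PySem.Int.mod_eq_zero_iff_dvd c q).mpr hqd)
  · exact pvDvd_false primes c h h2

theorem pvInv_step (primes : List Int) (c : Int) (h : pvInv primes c) :
    pvInv (if pvCheckA primes c then primes ++ [c] else primes) (c + 1) := by
  obtain ⟨hsort, h2, hmem⟩ := h
  by_cases hchk : pvCheckA primes c
  · have hcprime : Nat.Prime c.natAbs := (pvCheckA_prime primes c ⟨hsort, h2, hmem⟩).mp hchk
    simp only [hchk, if_pos]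
    refine ⟨?_, by omega, ?_⟩
    · rw [List.pairwise_append]
      exact ⟨hsort, List.pairwise_singleton _ _,
        fun a ha b hb => by
          rw [List.mem_singleton] at hb
          subst hb
          exact ((hmem a).mp ha).2.1⟩
    · intro p
      rw [List.mem_append, List.mem_singleton, hmem p]
      constructor
      · rintro (⟨hp2, hplt, hpp⟩ | rfl)
        · exact ⟨hp2, by omega, hpp⟩
        · exact ⟨h2, by omega, hcprime⟩
      · rintro ⟨hp2, hplt, hpp⟩
        by_cases hpc : p = c
        · right; exact hpc
        · left; exact ⟨hp2, by omega, hpp⟩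
  · have hcnp : ¬ Nat.Prime c.natAbs :=
      fun hp => hchk ((pvCheckA_prime primes c ⟨hsort, h2, hmem⟩).mpr hp)
    rw [if_neg hchk]
    refine ⟨hsort, by omega, ?_⟩
    intro p
    rw [hmem p]
    constructor
    · rintro ⟨hp2, hplt, hpp⟩; exact ⟨hp2, by omega, hpp⟩
    · rintro ⟨hp2, hplt, hpp⟩
      refine ⟨hp2, ?_, hpp⟩
      by_cases hpc : p = c
      · subst hpc; exact absurd hpp hcnp
      · omega

-- B's trial loop, with enough fuel, tests every divisor d ≤ sqrt c
theorem pvTrialB_iff (c : Int) (f : Nat) :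
    ∀ d : Int, 2 ≤ d → c < (d + (f : Int)) * (d + (f : Int)) →
    (pvTrialB c f d = true ↔ ∀ e : Int, d ≤ e → e * e ≤ c → ¬ PySem.Int.mod c e = 0) := by
  induction f with
  | zero =>
    intro d hd hbound
    simp only [pvTrialB]
    constructor
    · intro _ e hde hec
      exfalso
      have : d * d ≤ e * e := by nlinarith
      simp at hbound
      nlinarith
    · intro _; trivial
  | succ f ih =>
    intro d hd hbound
    simp only [pvTrialB]
    by_cases hsq : d * d ≤ c
    · rw [if_pos hsq]
      by_cases hm : PySem.Int.mod c d = 0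
      · simp only [hm, if_pos]
        constructor
        · intro h; exact absurd h (by simp)
        · intro h; exact absurd (h d le_rfl hsq) (by simp [hm])
      · rw [if_neg hm]
        rw [ih (d + 1) (by omega) (by push_cast at hbound ⊢; nlinarith)]
        constructor
        · intro h e hde hec
          rcases eq_or_lt_of_le hde with rfl | hlt
          · exact hm
          · exact h e (by omega) hec
        · intro h e hde hec
          exact h e (by omega) hec
    · rw [if_neg hsq]
      constructor
      · intro _ e hde hec
        exfalso
        have : d * d ≤ e * e := by nlinarith
        nlinarith
      · intro _; trivial

theorem pvIsPrimeB_iff (c : Int) (h2 : 2 ≤ c) :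
    pvIsPrimeB c = true ↔ Nat.Prime c.natAbs := by
  have hct : (c.toNat : Int) = c := by omega
  have hb : c < (2 + ((c.toNat + 2 : Nat) : Int)) * (2 + ((c.toNat + 2 : Nat) : Int)) := by
    push_cast
    nlinarith [hct.symm ▸ h2]
  unfold pvIsPrimeB
  rw [pvTrialB_iff c (c.toNat + 2) 2 le_rfl hb]
  constructor
  · intro hall
    by_contra hnp
    obtain ⟨q, hq2, _, hqsq, _, hqd⟩ := pvSmallFactor c h2 hnp
    exact hall q hq2 hqsq ((PySem.Int.mod_eq_zero_iff_dvd c q).mpr hqd)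
  · intro hp e he2 hec hmod
    have hdvd : e ∣ c := (PySem.Int.mod_eq_zero_iff_dvd c e).mp hmod
    have hdn : e.natAbs ∣ c.natAbs := Int.natAbs_dvd_natAbs.mpr hdvd
    rcases Nat.Prime.eq_one_or_self_of_dvd hp _ hdn with h1 | hself
    · omega
    · have : e = c := by omega
      nlinarith [this ▸ hec]

-- the next-prime search returns the least prime ≥ c when some prime lies within its fuel
theorem pvNextB_spec (f : Nat) :
    ∀ c : Int, 2 ≤ c →
    (∃ p : Int, Nat.Prime p.natAbs ∧ c ≤ p ∧ p < c + f) →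
    c ≤ pvNextB f c ∧ Nat.Prime (pvNextB f c).natAbs ∧
      ∀ r : Int, c ≤ r → r < pvNextB f c → ¬ Nat.Prime r.natAbs := by
  induction f with
  | zero =>
    intro c _ ⟨p, _, h1, h2⟩
    exfalso; push_cast at h2; omega
  | succ f ih =>
    intro c hc ⟨p, hp, hcp, hpf⟩
    simp only [pvNextB]
    by_cases hpr : pvIsPrimeB c
    · rw [if_pos hpr]
      exact ⟨le_rfl, (pvIsPrimeB_iff c hc).mp hpr, fun r h1 h2 => by omega⟩
    · rw [if_neg hpr]
      have hcnp : ¬ Nat.Prime c.natAbs := fun h => hpr ((pvIsPrimeB_iff c hc).mpr h)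
      have hpne : p ≠ c := fun h => hcnp (h ▸ hp)
      obtain ⟨h1, h2, h3⟩ := ih (c + 1) (by omega)
        ⟨p, hp, by omega, by push_cast at hpf ⊢; omega⟩
      refine ⟨by omega, h2, ?_⟩
      intro r hr1 hr2
      rcases eq_or_lt_of_le hr1 with rfl | hlt
      · exact hcnp
      · exact h3 r (by omega) hr2

-- Bertrand's postulate, Int form: a prime in [c, 2c]
theorem pvExistsPrime (c : Int) (h2 : 2 ≤ c) :
    ∃ p : Int, Nat.Prime p.natAbs ∧ c ≤ p ∧ p ≤ 2 * c := by
  obtain ⟨p, hp, h1, hle⟩ := Nat.exists_prime_lt_and_le_two_mul c.toNat (by omega)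
  exact ⟨(p : Int), by simpa using hp, by omega, by omega⟩

-- once the list has reached the target length, A's loop is the identity
theorem pvLoopA_done (n : Int) (fuel : Nat) (primes : List Int) (c : Int)
    (h : ¬ ((primes.length : Int) < n)) : pvLoopA n fuel primes c = primes := by
  cases fuel <;> simp [pvLoopA, h]

-- the invariant is preserved while skipping a block of composite candidates
theorem pvInv_skip (g : Nat) :
    ∀ c : Int, ∀ primes : List Int, pvInv primes c →
    (∀ r : Int, c ≤ r → r < c + g → ¬ Nat.Prime r.natAbs) →
    pvInv primes (c + g) := by
  induction g with
  | zero => intro c primes h _; simpa using h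
  | succ g ih =>
    intro c primes h hcomp
    have hcnp : ¬ Nat.Prime c.natAbs := hcomp c le_rfl (by push_cast; omega)
    have hchk : ¬ pvCheckA primes c = true :=
      fun hc => hcnp ((pvCheckA_prime primes c h).mp hc)
    have := pvInv_step primes c h
    rw [if_neg hchk] at this
    have hres := ih (c + 1) primes this
      (fun r h1 h2 => hcomp r (by omega) (by push_cast at h2 ⊢; omega))
    have : c + 1 + (g : Int) = c + ((g : Nat) + 1 : Nat) := by push_cast; ring
    rwa [this] at hres

-- A's loop ignores a block of composite candidates
theorem pvLoopA_skip (n : Int) (g : Nat) :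
    ∀ fuel : Nat, ∀ c : Int, ∀ primes : List Int, pvInv primes c →
    (primes.length : Int) < n →
    (∀ r : Int, c ≤ r → r < c + g → ¬ Nat.Prime r.natAbs) →
    pvLoopA n (g + fuel) primes c = pvLoopA n fuel primes (c + g) := by
  induction g with
  | zero => intro fuel c primes _ _ _; simp
  | succ g ih =>
    intro fuel c primes hinv hlen hcomp
    have harith : (g + 1) + fuel = (g + fuel) + 1 := by omega
    rw [harith]
    simp only [pvLoopA, if_pos hlen]
    have hcnp : ¬ Nat.Prime c.natAbs := hcomp c le_rfl (by push_cast; omega)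
    have hchk : ¬ pvCheckA primes c = true :=
      fun hc => hcnp ((pvCheckA_prime primes c hinv).mp hc)
    rw [if_neg hchk]
    have hinv' := pvInv_step primes c hinv
    rw [if_neg hchk] at hinv'
    have := ih fuel (c + 1) primes hinv' hlen
      (fun r h1 h2 => hcomp r (by omega) (by push_cast at h2 ⊢; omega))
    rw [this]
    congr 1
    push_cast; ring

-- main simulation: B's per-prime loop tracks A's per-candidate loop
theorem pvMain (n : Int) (k : Nat) :
    ∀ primes : List Int, ∀ c product : Int, ∀ fuelA : Nat,
    pvInv primes c →
    product = primes.foldl (fun acc p => acc * p) 1 →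
    (primes.length : Int) + k = n →
    (2 ^ k - 1) * (c.toNat + 1) ≤ fuelA →
    ∃ (P : List Int) (cf : Int),
      pvLoopA n fuelA primes c = P ∧
      pvRunB k product c = (P.foldl (fun acc p => acc * p) 1, cf) ∧
      (k = 0 → P = primes ∧ cf = c) ∧
      (0 < k → PySem.List.pyGet? P (-1) = some (cf - 1)) := by
  induction k with
  | zero =>
    intro primes c product fuelA hinv hprod hlen _
    have hnl : ¬ ((primes.length : Int) < n) := by push_cast at hlen; omega
    exact ⟨primes, c, pvLoopA_done n fuelA primes c hnl, by simp [pvRunB, hprod],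
      fun _ => ⟨rfl, rfl⟩, fun h => absurd h (by omega)⟩
  | succ k ih =>
    intro primes c product fuelA hinv hprod hlen hfuel
    have hc2 : 2 ≤ c := hinv.2.1
    have hlen' : (primes.length : Int) < n := by push_cast at hlen; omega
    -- the next prime q found by B
    obtain ⟨p, hpprime, hcp, hp2c⟩ := pvExistsPrime c hc2
    have hpfuel : p < c + ((2 * c.toNat + 4 : Nat) : Int) := by push_cast; omega
    obtain ⟨hcq, hqprime, hqmin⟩ :=
      pvNextB_spec (2 * c.toNat + 4) c hc2 ⟨p, hpprime, hcp, hpfuel⟩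
    set q := pvNextB (2 * c.toNat + 4) c with hqdef
    have hq2c : q ≤ 2 * c := by
      by_contra hgt
      exact hqmin p hcp (by omega) hpprime
    have hq2 : 2 ≤ q := by omega
    -- A skips the composites in [c, q), then takes q
    set g : Nat := (q - c).toNat with hgdef
    have hcg : c + (g : Int) = q := by omega
    have hg1 : g + 1 ≤ c.toNat + 1 := by omega
    -- fuel bookkeeping
    obtain ⟨b, hb⟩ : ∃ b, 2 ^ k = b + 1 := ⟨2 ^ k - 1, by have := Nat.one_le_two_pow (n := k); omega⟩
    have hfuel' : (2 ^ (k + 1) - 1) * (c.toNat + 1) ≤ fuelA := hfuel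
    have hpow : 2 ^ (k + 1) = 2 * (b + 1) := by rw [pow_succ, hb]; ring
    have hsplit : g + 1 + (b * (2 * (c.toNat + 1))) ≤ fuelA := by
      have hx : 2 * (b + 1) - 1 = 2 * b + 1 := by omega
      have h1 : (2 ^ (k + 1) - 1) * (c.toNat + 1) = (2 * b + 1) * (c.toNat + 1) := by
        rw [hpow, hx]
      have h2 : (2 * b + 1) * (c.toNat + 1) = b * (2 * (c.toNat + 1)) + (c.toNat + 1) := by ring
      omega
    set fuel' : Nat := fuelA - g - 1 with hfdef
    have hfA : fuelA = g + (fuel' + 1) := by omega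
    have hskip := pvLoopA_skip n g (fuel' + 1) c primes hinv hlen'
      (fun r h1 h2 => hqmin r h1 (by omega))
    have hinvq : pvInv primes q := by
      have := pvInv_skip g c primes hinv (fun r h1 h2 => hqmin r h1 (by omega))
      rwa [hcg] at this
    have hchkq : pvCheckA primes q = true := (pvCheckA_prime primes q hinvq).mpr hqprime
    have hinvq' := pvInv_step primes q hinvq
    rw [if_pos hchkq] at hinvq'
    -- one A step at q
    have hstep : pvLoopA n (fuel' + 1) primes q = pvLoopA n fuel' (primes ++ [q]) (q + 1) := by
      simp only [pvLoopA, if_pos hlen', if_pos hchkq]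
    -- recursive call
    have hfuelrec : (2 ^ k - 1) * ((q + 1).toNat + 1) ≤ fuel' := by
      have hqb : (q + 1).toNat + 1 ≤ 2 * (c.toNat + 1) := by omega
      have : (2 ^ k - 1) * ((q + 1).toNat + 1) ≤ b * (2 * (c.toNat + 1)) := by
        rw [hb]
        exact Nat.mul_le_mul_left b hqb
      omega
    obtain ⟨P, cf, hA, hB, h0, hpos⟩ := ih (primes ++ [q]) (q + 1) (product * q) fuel'
      hinvq' (by simp [hprod]) (by push_cast at hlen ⊢; simp; omega) hfuelrec
    refine ⟨P, cf, ?_, ?_, fun h => absurd h (by omega), ?_⟩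
    · rw [hfA, hskip, hcg, hstep, hA]
    · simp only [pvRunB, ← hqdef]
      exact hB
    · intro _
      rcases Nat.eq_zero_or_pos k with rfl | hk
      · obtain ⟨hP, hcf⟩ := h0 rfl
        rw [hP, hcf]
        rw [PySem.List.pyGet?_neg_one_append_singleton]
        congr 1; ring
      · exact hpos hk

-- ===== VERDICT (by name: the statement is the Claim_ definition above) =====
theorem estimate_concept_size_spec : Claim_equal_estimate_concept_size := by
  intro n _ hpre
  have hpre' : 1 ≤ n := hpre
  unfold Spec_estimate_concept_size estimate_concept_size estimate_concept_size_alt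
  have hinv : pvInv [] 2 := by
    refine ⟨List.Pairwise.nil, le_refl _, ?_⟩
    intro p; simp; omega
  have hlen : ((List.length ([] : List Int) : Int)) + (n.toNat : Int) = n := by
    simp; omega
  have hfuel : (2 ^ n.toNat - 1) * ((2 : Int).toNat + 1) ≤ 2 ^ (n.toNat + 2) := by
    have h1 : (2 : Nat) ^ (n.toNat + 2) = 4 * 2 ^ n.toNat := by ring
    have h2 : 1 ≤ (2 : Nat) ^ n.toNat := Nat.one_le_two_pow
    have h3 : (2 : Int).toNat + 1 = 3 := by decide
    rw [h3, h1]
    omega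
  obtain ⟨P, cf, hA, hB, _, hpos⟩ :=
    pvMain n n.toNat [] 2 1 (2 ^ (n.toNat + 2)) hinv (by simp) hlen hfuel
  have hlast := hpos (by omega)
  simp only [hA, hB, hlast]
  simp
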